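-- pv_equiv track=rewrite | github.com/ChiaYiCheng-NTU/PREDICT | Functions/FindKmers/Packages/Didnt_Find_Enriches_Kai.py | DropTheLargerP
-- ===== SOURCE A (Python) =====
-- def DropTheLargerP(KmerFET_Dict_Result):
--     DroppedLargerP_KmerPavlue_Dict = KmerFET_Dict_Result
--     KmerFET_Dict_Keys = KmerFET_Dict_Result.keys()
--     for K in range(11, 4, -1):
--         ToDelete_Set = set()
--         K_KmerFET_Dict_Keys = [Kmer for Kmer in KmerFET_Dict_Keys if len(Kmer)==K]
--         Kp1_KmerFET_Dict_Keys = [Kmer for Kmer in KmerFET_Dict_Keys if len(Kmer)==K+1]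
--         for Kmer in K_KmerFET_Dict_Keys:
--             for Kp1mer in Kp1_KmerFET_Dict_Keys:
--                 if Kmer in Kp1mer:
--                     if KmerFET_Dict_Result[Kmer].split("\t")[2] >= KmerFET_Dict_Result[Kp1mer].split("\t")[2]:
--                         ToDelete_Set.add(Kmer)
--                     else:
--                         ToDelete_Set.add(Kp1mer)
--
--     for ToDeleteKmer in ToDelete_Set:
--         del DroppedLargerP_KmerPavlue_Dict[ToDeleteKmer]
--     # for ToDeleteKmer in ToDelete_Set:
--     #     if ToDeleteKmer in KmerFET_Dict_Result.keys():
--     #         OutPut_KmerFET_Dict.update({ToDeleteKmer: KmerFET_Dict_Result[ToDeleteKmer]})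
--     return DroppedLargerP_KmerPavlue_Dict
-- ===== SOURCE B (Python) =====
-- def DropTheLargerP(KmerFET_Dict_Result):
--     # Only the K=5 round's ToDelete_Set survives A's outer loop (the set is
--     # rebuilt each K and the deletions happen only after the loop), so compute
--     # just that round: index the 5-mers once, then drive the comparison by the
--     # 6-mers and their two length-5 substrings.  Mutates the dict in place
--     # exactly like A.
--     five = {k: v for k, v in KmerFET_Dict_Result.items() if len(k) == 5}
--     to_delete = set()
--     for kp1, v6 in KmerFET_Dict_Result.items():
--         if len(kp1) == 6:
--             for sub in (kp1[:5], kp1[1:]):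
--                 if sub in five:
--                     if five[sub].split("\t")[2] >= v6.split("\t")[2]:
--                         to_delete.add(sub)
--                     else:
--                         to_delete.add(kp1)
--     for k in to_delete:
--         del KmerFET_Dict_Result[k]
--     return KmerFET_Dict_Result
-- ===== Notes on version B (the rewrite author's own statement) =====
-- stated objective: alternative
-- what changed: A runs seven rounds (K=11..5) of a nested k-mer x (k+1)-mer containment scan but only the last round's ToDelete_Set survives to the deletion loop, so B computes exactly that K=5 round in one pass: it indexes the 5-mer keys in a dict once and, driven by the 6-mers, looks up each 6-mer's two length-5 substrings.
import Mathlib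
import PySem

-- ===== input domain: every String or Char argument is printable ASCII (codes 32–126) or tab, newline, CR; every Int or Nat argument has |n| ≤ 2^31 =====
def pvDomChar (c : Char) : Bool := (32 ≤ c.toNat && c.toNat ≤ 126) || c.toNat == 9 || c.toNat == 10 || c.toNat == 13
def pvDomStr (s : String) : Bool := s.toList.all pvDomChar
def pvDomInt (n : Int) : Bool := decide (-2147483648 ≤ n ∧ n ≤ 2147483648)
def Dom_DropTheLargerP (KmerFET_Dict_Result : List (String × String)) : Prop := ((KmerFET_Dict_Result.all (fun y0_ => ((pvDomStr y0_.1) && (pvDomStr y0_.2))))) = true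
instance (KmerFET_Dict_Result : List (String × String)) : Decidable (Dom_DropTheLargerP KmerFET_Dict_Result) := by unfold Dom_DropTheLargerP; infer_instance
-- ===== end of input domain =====

-- A runs seven rounds (K=11..5) of a nested k-mer × (k+1)-mer containment scan, but only
-- the last (K=5) round's ToDelete_Set survives to the deletion loop after it; B therefore
-- computes exactly that round in one pass: a dict of the 5-mer keys built once, then the
-- 6-mers drive lookups of their two length-5 substrings (objective: alternative).  Both A and B
-- mutate the input dict in place (deleting keys); the equivalence proved here is about the
-- returned dict.

-- shared dict helpers (both Pythons read/delete the same dict the same way)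
-- d[k] for a key k known to be present (Pre_ excludes duplicate keys)
def pvLookup (d : List (String × String)) (k : String) : String :=
  (((d.find? (fun p => p.1 == k)).map Prod.snd).getD "")

-- d[k].split("\t")[2]; Pre_ guarantees index 2 exists where this is evaluated
def pvField2 (d : List (String × String)) (k : String) : String :=
  PySem.List.pyGetD ((PySem.Str.split? (pvLookup d k) "\t").getD []) 2 ""

-- del d[k] (removes the first pair with that key; unique under Pre_)
def pvDel : List (String × String) → String → List (String × String)
  | [], _ => []
  | p :: rest, k => if p.1 == k then rest else p :: pvDel rest k

-- ===== PORT A =====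
-- one iteration of A's outer loop: ToDelete_Set = set(); nested scan over all pairs
def pvToDeleteA (d : List (String × String)) (K : Int) : PySem.Set String :=
  let keys := d.map Prod.fst
  let kKeys := keys.filter (fun s => PySem.Str.len s == K)
  let kp1Keys := keys.filter (fun s => PySem.Str.len s == K + 1)
  kKeys.foldl (fun st kmer =>
    kp1Keys.foldl (fun st kp1 =>
      if PySem.Str.isIn kmer kp1 then
        if pvField2 d kp1 ≤ pvField2 d kmer then PySem.Set.add st kmer
        else PySem.Set.add st kp1
      else st) st) PySem.Set.empty

def DropTheLargerP (KmerFET_Dict_Result : List (String × String)) : List (String × String) :=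
  -- for K in range(11, 4, -1): ToDelete_Set = set(); …  (the set is rebuilt each K;
  -- only the one left after the loop is used for the deletions, exactly as in A)
  let toDelete :=
    (PySem.List.pyRange 11 4 (-1)).foldl
      (fun _ K => pvToDeleteA KmerFET_Dict_Result K) PySem.Set.empty
  -- final deletions: dict content is independent of the set's iteration order
  toDelete.foldl pvDel KmerFET_Dict_Result

-- ===== PORT B =====
-- v.split("\t")[2] computed on a value B already holds (B never re-reads the dict for it)
def pvF2 (v : String) : String :=
  PySem.List.pyGetD ((PySem.Str.split? v "\t").getD []) 2 ""

-- five = {k: v for k, v in KmerFET_Dict_Result.items() if len(k) == 5}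
def pvFive (d : List (String × String)) : PySem.Dict String String :=
  d.foldl (fun acc p => if PySem.Str.len p.1 == 5 then acc.insert p.1 p.2 else acc)
    PySem.Dict.empty

-- the single pass: each 6-mer item contributes its two length-5 substrings,
-- looked up in `five` ('sub in five' = contains; 'five[sub]' under that guard = getD,
-- whose default is never used)
def pvToDelete6 (d : List (String × String)) : PySem.Set String :=
  d.foldl (fun st p =>
    if PySem.Str.len p.1 == 6 then
      [PySem.Str.slice p.1 none (some 5), PySem.Str.slice p.1 (some 1) none].foldl
        (fun st sub =>
          if (pvFive d).contains sub then
            if pvF2 p.2 ≤ pvF2 ((pvFive d).getD sub "") then PySem.Set.add st sub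
            else PySem.Set.add st p.1
          else st) st
    else st) PySem.Set.empty

def DropTheLargerP_alt (KmerFET_Dict_Result : List (String × String)) : List (String × String) :=
  (pvToDelete6 KmerFET_Dict_Result).foldl pvDel KmerFET_Dict_Result

-- ===== PRECONDITION & SPEC =====
-- Pre_ excludes (a) lists with duplicate keys, which a Python dict cannot represent,
-- and (b) inputs where some compared k-mer/(k+1)-mer value has fewer than 3
-- tab-separated fields, on which Python A raises IndexError.
def Pre_DropTheLargerP (KmerFET_Dict_Result : List (String × String)) : Prop :=
  (KmerFET_Dict_Result.map Prod.fst).Nodup ∧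
  ∀ p ∈ KmerFET_Dict_Result, ∀ q ∈ KmerFET_Dict_Result,
    5 ≤ PySem.Str.len p.1 → PySem.Str.len p.1 ≤ 11 →
    PySem.Str.len q.1 = PySem.Str.len p.1 + 1 →
    PySem.Str.isIn p.1 q.1 = true →
    3 ≤ ((PySem.Str.split? p.2 "\t").getD []).length ∧
    3 ≤ ((PySem.Str.split? q.2 "\t").getD []).length
instance (KmerFET_Dict_Result : List (String × String)) : Decidable (Pre_DropTheLargerP KmerFET_Dict_Result) := by unfold Pre_DropTheLargerP; infer_instance

def pvWitness_DropTheLargerP : (List (String × String)) :=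
  [("AACGT", "12\t0.4\t0.01"), ("AACGTT", "15\t0.5\t0.03"), ("CGT", "1\t2")]

def Spec_DropTheLargerP (KmerFET_Dict_Result : List (String × String)) (out : List (String × String)) : Prop := out = DropTheLargerP_alt KmerFET_Dict_Result
instance (KmerFET_Dict_Result : List (String × String)) (out : List (String × String)) : Decidable (Spec_DropTheLargerP KmerFET_Dict_Result out) := by unfold Spec_DropTheLargerP; infer_instance

-- ===== CLAIM (what is proved, stated in full; the proofs are below) =====
def Claim_equal_DropTheLargerP : Prop := ∀ (KmerFET_Dict_Result : List (String × String)), Dom_DropTheLargerP KmerFET_Dict_Result → Pre_DropTheLargerP KmerFET_Dict_Result → Spec_DropTheLargerP KmerFET_Dict_Result (DropTheLargerP KmerFET_Dict_Result)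

-- ===== LEMMAS AND PROOFS =====

theorem pvWitness_ok : Dom_DropTheLargerP pvWitness_DropTheLargerP ∧ Pre_DropTheLargerP pvWitness_DropTheLargerP := by
  constructor <;> decide

-- pvField2 reads the stored value through the dict; pvF2 reads it directly
theorem pvField2_eq (d : List (String × String)) (k : String) :
    pvField2 d k = pvF2 (pvLookup d k) := rfl

-- on a duplicate-free dict, looking a member pair's key up returns its value
theorem pvLookup_mem {d : List (String × String)} (hnd : (d.map Prod.fst).Nodup)
    {q : String × String} (hq : q ∈ d) : pvLookup d q.1 = q.2 := by
  induction d with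
  | nil => cases hq
  | cons p rest ih =>
    simp only [List.map_cons, List.nodup_cons] at hnd
    rcases List.mem_cons.mp hq with rfl | hq'
    · simp [pvLookup, List.find?]
    · have hne : p.1 ≠ q.1 := by
        intro h
        exact hnd.1 (h ▸ List.mem_map_of_mem hq')
      unfold pvLookup
      rw [List.find?_cons_of_neg (by simp [hne])]
      exact ih hnd.2 hq'

-- a fold that ignores its state over the literal range [11,…,5] is its last iteration
theorem foldl_range_last {S : Type} (g : Int → S) (s0 : S) :
    (PySem.List.pyRange 11 4 (-1)).foldl (fun _ K => g K) s0 = g 5 := by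
  rw [show PySem.List.pyRange 11 4 (-1) = [11,10,9,8,7,6,5] from by decide]
  simp [List.foldl]

-- membership through a fold whose every step only (conditionally) adds elements
theorem mem_foldl_step {β : Type} (x : String) (F : PySem.Set String → β → PySem.Set String)
    (Q : β → Prop) (h : ∀ st b, x ∈ F st b ↔ x ∈ st ∨ Q b) :
    ∀ (l : List β) (s0 : PySem.Set String), x ∈ l.foldl F s0 ↔ x ∈ s0 ∨ ∃ b ∈ l, Q b := by
  intro l
  induction l with
  | nil => simp
  | cons b l ih => intro s0; rw [List.foldl_cons, ih, h]; simp; tauto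

theorem mem_step_add (x y z : String) (c : Bool) (P : Prop) [Decidable P]
    (st : PySem.Set String) :
    x ∈ (if c then (if P then st.add y else st.add z) else st) ↔
      x ∈ st ∨ (c = true ∧ x = (if P then y else z)) := by
  cases c <;> by_cases hP : P <;> simp [hP, PySem.Set.mem_add]

theorem mem_innerA (d : List (String × String)) (kmer : String) (l : List String)
    (st : PySem.Set String) (x : String) :
    x ∈ l.foldl (fun st kp1 =>
        if PySem.Str.isIn kmer kp1 then
          if pvField2 d kp1 ≤ pvField2 d kmer then PySem.Set.add st kmer
          else PySem.Set.add st kp1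
        else st) st ↔
      x ∈ st ∨ ∃ kp1 ∈ l, PySem.Str.isIn kmer kp1 = true ∧
        x = (if pvField2 d kp1 ≤ pvField2 d kmer then kmer else kp1) := by
  exact mem_foldl_step x _ _
    (fun st kp1 => mem_step_add x kmer kp1 (PySem.Str.isIn kmer kp1) (pvField2 d kp1 ≤ pvField2 d kmer) st) l st

theorem mem_toDeleteA (d : List (String × String)) (K : Int) (x : String) :
    x ∈ pvToDeleteA d K ↔
      ∃ kmer ∈ d.map Prod.fst, PySem.Str.len kmer = K ∧
      ∃ kp1 ∈ d.map Prod.fst, PySem.Str.len kp1 = K + 1 ∧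
        PySem.Str.isIn kmer kp1 = true ∧
        x = (if pvField2 d kp1 ≤ pvField2 d kmer then kmer else kp1) := by
  unfold pvToDeleteA
  rw [mem_foldl_step x _
      (fun kmer => ∃ kp1 ∈ (d.map Prod.fst).filter (fun s => PySem.Str.len s == K + 1),
        PySem.Str.isIn kmer kp1 = true ∧
        x = (if pvField2 d kp1 ≤ pvField2 d kmer then kmer else kp1))
      (fun st kmer => by rw [mem_innerA])]
  simp only [PySem.Set.empty, List.mem_filter, beq_iff_eq, List.not_mem_nil, false_or]
  constructor
  · rintro ⟨kmer, ⟨hk, hlk⟩, kp1, ⟨hp, hlp⟩, hin, hx⟩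
    exact ⟨kmer, hk, hlk, kp1, hp, hlp, hin, hx⟩
  · rintro ⟨kmer, hk, hlk, kp1, hp, hlp, hin, hx⟩
    exact ⟨kmer, ⟨hk, hlk⟩, kp1, ⟨hp, hlp⟩, hin, hx⟩

-- the 5-mer dict B builds, characterised: its items are exactly the length-5 pairs
theorem items_pvFive (d : List (String × String)) (hnd : (d.map Prod.fst).Nodup) :
    (pvFive d).items = d.filter (fun p => PySem.Str.len p.1 == 5) := by
  unfold pvFive
  have h1 : List.foldl
        (fun acc p => if PySem.Str.len p.1 == 5 then acc.insert p.1 p.2 else acc)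
        PySem.Dict.empty d
      = List.foldl (fun acc p => acc.insert p.1 p.2) PySem.Dict.empty
          (d.filter (fun p => PySem.Str.len p.1 == 5)) := List.foldl_filter.symm
  rw [h1]
  have hsub : ((d.filter (fun p => PySem.Str.len p.1 == 5)).map Prod.fst).Nodup :=
    (List.filter_sublist.map Prod.fst).nodup hnd
  rw [PySem.Dict.items_foldl_insert_fresh _ Prod.fst Prod.snd _
        (fun a _ => PySem.Dict.contains_empty _) hsub]
  simp [PySem.Dict.empty]

theorem keys_pvFive (d : List (String × String)) (hnd : (d.map Prod.fst).Nodup) :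
    (pvFive d).keys = (d.filter (fun p => PySem.Str.len p.1 == 5)).map Prod.fst := by
  simp only [PySem.Dict.keys, items_pvFive d hnd]

theorem contains_pvFive (d : List (String × String)) (hnd : (d.map Prod.fst).Nodup)
    (sub : String) :
    (pvFive d).contains sub = true ↔ sub ∈ d.map Prod.fst ∧ PySem.Str.len sub = 5 := by
  rw [PySem.Dict.contains_iff_mem_keys, keys_pvFive d hnd]
  simp only [List.mem_map, List.mem_filter, beq_iff_eq]
  constructor
  · rintro ⟨p, ⟨hp, h5⟩, rfl⟩
    exact ⟨⟨p, hp, rfl⟩, h5⟩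
  · rintro ⟨⟨p, hp, rfl⟩, h5⟩
    exact ⟨p, ⟨hp, h5⟩, rfl⟩

theorem getD_pvFive (d : List (String × String)) (hnd : (d.map Prod.fst).Nodup)
    {p : String × String} (hp : p ∈ d) (h5 : PySem.Str.len p.1 = 5) :
    (pvFive d).getD p.1 "" = p.2 := by
  apply PySem.Dict.getD_of_mem_items
  · rw [items_pvFive d hnd, List.mem_filter]
    exact ⟨hp, by simpa using h5⟩
  · rw [keys_pvFive d hnd]
    exact (List.filter_sublist.map Prod.fst).nodup hnd

theorem mem_toDelete6 (d : List (String × String)) (hnd : (d.map Prod.fst).Nodup)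
    (x : String) :
    x ∈ pvToDelete6 d ↔
      ∃ q ∈ d, PySem.Str.len q.1 = (6 : Int) ∧
      ∃ sub ∈ [PySem.Str.slice q.1 none (some 5), PySem.Str.slice q.1 (some 1) none],
        (sub ∈ d.map Prod.fst ∧ PySem.Str.len sub = (5 : Int)) ∧
        x = (if pvField2 d q.1 ≤ pvField2 d sub then sub else q.1) := by
  unfold pvToDelete6
  rw [mem_foldl_step x _
      (fun q => PySem.Str.len q.1 = (6 : Int) ∧
        ∃ sub ∈ [PySem.Str.slice q.1 none (some 5), PySem.Str.slice q.1 (some 1) none],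
          (pvFive d).contains sub = true ∧
          x = (if pvF2 q.2 ≤ pvF2 ((pvFive d).getD sub "") then sub else q.1))
      (fun st q => by
        split_ifs with hlen
        · rw [mem_foldl_step x _ _
              (fun st sub => mem_step_add x sub q.1 ((pvFive d).contains sub)
                (pvF2 q.2 ≤ pvF2 ((pvFive d).getD sub "")) st)]
          simp only [beq_iff_eq] at hlen
          tauto
        · simp only [beq_iff_eq] at hlen
          tauto)]
  simp only [PySem.Set.empty, List.not_mem_nil, false_or]
  constructor
  · rintro ⟨q, hq, hl6, sub, hs, hc, hx⟩
    obtain ⟨hkey, hl5⟩ := (contains_pvFive d hnd sub).mp hc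
    obtain ⟨p, hp, rfl⟩ := List.mem_map.mp hkey
    refine ⟨q, hq, hl6, p.1, hs, ⟨List.mem_map_of_mem hp, hl5⟩, ?_⟩
    rw [getD_pvFive d hnd hp hl5] at hx
    rw [pvField2_eq, pvField2_eq, pvLookup_mem hnd hq, pvLookup_mem hnd hp]
    exact hx
  · rintro ⟨q, hq, hl6, sub, hs, ⟨hkey, hl5⟩, hx⟩
    obtain ⟨p, hp, rfl⟩ := List.mem_map.mp hkey
    refine ⟨q, hq, hl6, p.1, hs,
      (contains_pvFive d hnd p.1).mpr ⟨List.mem_map_of_mem hp, hl5⟩, ?_⟩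
    rw [getD_pvFive d hnd hp hl5]
    rw [pvField2_eq, pvField2_eq, pvLookup_mem hnd hq, pvLookup_mem hnd hp] at hx
    exact hx

theorem infix_len_succ {l₁ l₂ : List Char} (h : l₂.length = l₁.length + 1) :
    l₁ <:+: l₂ ↔ l₁ = l₂.take l₁.length ∨ l₁ = l₂.drop 1 := by
  constructor
  · rintro ⟨u, v, rfl⟩
    simp only [List.length_append] at h
    rcases Nat.eq_zero_or_pos u.length with hu | hu
    · left
      rw [List.eq_nil_of_length_eq_zero hu]
      simp
    · right
      have hv : v = [] := by
        apply List.eq_nil_of_length_eq_zero; omega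
      have hu1 : u.length = 1 := by omega
      subst hv
      rw [List.append_nil, show (1 : Nat) = u.length from hu1.symm, List.drop_left]
  · rintro (hl | hl)
    · rw [hl]; exact (List.take_prefix _ _).isInfix
    · rw [hl]; exact (List.drop_suffix _ _).isInfix

theorem isIn_five_six {kmer kp1 : String} (h5 : PySem.Str.len kmer = 5)
    (h6 : PySem.Str.len kp1 = 6) :
    PySem.Str.isIn kmer kp1 = true ↔
      kmer = PySem.Str.slice kp1 none (some 5) ∨ kmer = PySem.Str.slice kp1 (some 1) none := by
  rw [PySem.Str.len_eq] at h5 h6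
  have h5' : kmer.toList.length = 5 := by exact_mod_cast h5
  have h6' : kp1.toList.length = 6 := by exact_mod_cast h6
  rw [PySem.Str.isIn_iff_infix, infix_len_succ (by omega)]
  have ht : (PySem.Str.slice kp1 none (some 5)).toList = kp1.toList.take 5 := by
    rw [PySem.Str.toList_slice]
    exact PySem.List.slice_to _ (by norm_num)
  have hd : (PySem.Str.slice kp1 (some 1) none).toList = kp1.toList.drop 1 := by
    rw [PySem.Str.toList_slice]
    exact PySem.List.slice_from _ (by norm_num)
  rw [h5', ← ht, ← hd]
  constructor
  · rintro (h | h) <;> [left; right] <;> exact String.toList_inj.mp h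
  · rintro (h | h) <;> [left; right] <;> exact congrArg String.toList h

theorem toDelete5_eq (d : List (String × String)) (hnd : (d.map Prod.fst).Nodup)
    (x : String) : x ∈ pvToDeleteA d 5 ↔ x ∈ pvToDelete6 d := by
  rw [mem_toDeleteA, mem_toDelete6 d hnd]
  constructor
  · rintro ⟨kmer, hk, hlk, kp1, hp, hlp, hin, hx⟩
    have h6 : PySem.Str.len kp1 = 6 := by rw [hlp]; norm_num
    obtain ⟨q, hq, rfl⟩ := List.mem_map.mp hp
    have hslice := (isIn_five_six hlk h6).mp hin
    refine ⟨q, hq, h6, kmer, ?_, ⟨hk, hlk⟩, hx⟩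
    simpa using hslice
  · rintro ⟨q, hq, hl6, sub, hs, ⟨hsm, hsl⟩, hx⟩
    refine ⟨sub, hsm, hsl, q.1, List.mem_map_of_mem hq, by rw [hl6]; norm_num, ?_, hx⟩
    apply (isIn_five_six hsl hl6).mpr
    simpa using hs

theorem pvDel_eq_filter (k : String) :
    ∀ d : List (String × String), (d.map Prod.fst).Nodup →
      pvDel d k = d.filter (fun p => !(p.1 == k)) := by
  intro d
  induction d with
  | nil => intro _; rfl
  | cons p rest ih =>
    intro hnd
    simp only [List.map_cons, List.nodup_cons] at hnd
    by_cases hk : p.1 = k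
    · rw [pvDel, if_pos (by simp [hk]), List.filter_cons_of_neg (by simp [hk])]
      symm
      apply List.filter_eq_self.mpr
      intro q hq
      have : q.1 ∈ rest.map Prod.fst := List.mem_map_of_mem hq
      simp only [Bool.not_eq_eq_eq_not, Bool.not_true, beq_eq_false_iff_ne]
      intro hqk; exact hnd.1 (by rw [hk, ← hqk]; exact this)
    · rw [pvDel, if_neg (by simp [hk]), List.filter_cons_of_pos (by simp [hk]),
         ih hnd.2]

theorem nodup_pvDel (k : String) (d : List (String × String))
    (h : (d.map Prod.fst).Nodup) : ((pvDel d k).map Prod.fst).Nodup := by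
  rw [pvDel_eq_filter k d h]
  exact ((List.filter_sublist.map Prod.fst).nodup h : _)

theorem foldl_pvDel_eq_filter (l : List String) :
    ∀ d : List (String × String), (d.map Prod.fst).Nodup →
      l.foldl pvDel d = d.filter (fun p => !(l.contains p.1)) := by
  induction l with
  | nil => intro d _; simp
  | cons k l ih =>
    intro d hnd
    rw [List.foldl_cons, ih _ (nodup_pvDel k d hnd), pvDel_eq_filter k d hnd,
        List.filter_filter]
    apply List.filter_congr
    intro p _
    simp only [List.contains_cons, Bool.not_or]
    rw [Bool.and_comm]

-- ===== VERDICT (by name: the statement is the Claim_ definition above) =====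
theorem DropTheLargerP_spec : Claim_equal_DropTheLargerP := by
  intro d _ hpre
  obtain ⟨hnd, -⟩ := hpre
  unfold Spec_DropTheLargerP DropTheLargerP DropTheLargerP_alt
  rw [foldl_range_last,
      foldl_pvDel_eq_filter _ _ hnd, foldl_pvDel_eq_filter _ _ hnd]
  refine List.filter_congr (fun p _ => ?_)
  have h := toDelete5_eq d hnd p.1
  by_cases hx : p.1 ∈ pvToDeleteA d 5 <;> simp [hx, h.mp]; tauto
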